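-- pv_equiv track=rewrite | github.com/kungbob/Leetcode-Solution | python/999_Available_Captures_for_Rook.py | countRow
-- ===== SOURCE A (Python) =====
-- def countRow(row):
--     result = 0
--     for index in range(0, len(row)):
--         if row[index] == 'R':
--             for i in range(index, -1, -1):
--                 if row[i] == '.':
--                     continue
--                 elif row[i] == 'B':
--                     break
--                 elif row[i] == 'p':
--                     result += 1
--                     break
--             for i in range(index, len(row)):
--                 if row[i] == '.':
--                     continue
--                 elif row[i] == 'B':
--                     break
--                 elif row[i] == 'p':
--                     result += 1
--                     break
--             break
--     return result
-- ===== SOURCE B (Python) =====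
-- def countRow(row):
--     if 'R' not in row:
--         return 0
--     i = row.index('R')
--     left = [c for c in row[:i] if c in ('B', 'p')]
--     right = [c for c in row[i + 1:] if c in ('B', 'p')]
--     total = 0
--     if left and left[-1] == 'p':
--         total += 1
--     if right and right[0] == 'p':
--         total += 1
--     return total
-- ===== Notes on version B (the rewrite author's own statement) =====
-- stated objective: simpler
-- what changed: Replaces A's nested index loops (find 'R', then two directional index scans with break) by a single index('R') plus two filtered slices: the nearest blocking piece on the left is the last kept 'B'/'p' of row[:i], on the right the first kept one of row[i+1:].
import Mathlib
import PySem

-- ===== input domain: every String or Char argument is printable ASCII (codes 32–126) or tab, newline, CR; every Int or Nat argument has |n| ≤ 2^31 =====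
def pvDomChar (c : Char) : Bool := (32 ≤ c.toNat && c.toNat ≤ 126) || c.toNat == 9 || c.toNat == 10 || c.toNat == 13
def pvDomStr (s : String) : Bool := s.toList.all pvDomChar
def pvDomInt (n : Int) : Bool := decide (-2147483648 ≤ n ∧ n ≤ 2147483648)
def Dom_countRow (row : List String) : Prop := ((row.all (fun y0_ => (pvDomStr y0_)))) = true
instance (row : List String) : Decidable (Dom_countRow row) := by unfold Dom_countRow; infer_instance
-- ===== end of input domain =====

-- B replaces A's nested index scans by one find of 'R' plus two filtered slices (nearest blocker =
-- last kept piece on the left / first on the right); objective: simpler.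

-- ===== PORT A =====
-- A's inner 'for i in …: if row[i]…' loop (both directions share this body).
-- Every index fed to this loop lies in range, so pyGetD's default "" is never read.
def pvScanA (row : List String) (idxs : List Int) : Int :=
  match idxs with
  | [] => 0
  | i :: rest =>
    if PySem.List.pyGetD row i "" = "." then pvScanA row rest
    else if PySem.List.pyGetD row i "" = "B" then 0
    else if PySem.List.pyGetD row i "" = "p" then 1
    else pvScanA row rest

-- A's outer 'for index in range(0, len(row))' loop: find the first 'R', then run the two scans and break.
def pvOuterA (row : List String) (idxs : List Int) : Int :=
  match idxs with
  | [] => 0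
  | i :: rest =>
    if PySem.List.pyGetD row i "" = "R" then
      pvScanA row (PySem.List.pyRange i (-1) (-1)) + pvScanA row (PySem.List.pyRange i (row.length : Int) 1)
    else pvOuterA row rest

def countRow (row : List String) : Int :=
  pvOuterA row (PySem.List.pyRange 0 (row.length : Int) 1)

-- ===== PORT B =====
def pvKeep (c : String) : Bool := c == "B" || c == "p"

def countRow_alt (row : List String) : Int :=
  if "R" ∈ row then
    match PySem.List.index? row "R" with
    | none => 0
    | some i =>
      let left := (PySem.List.slice row none (some (i : Int))).filter pvKeep
      let right := (PySem.List.slice row (some ((i : Int) + 1)) none).filter pvKeep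
      (if left.getLast? = some "p" then 1 else 0) + (if right.head? = some "p" then 1 else 0)
  else 0

-- ===== PRECONDITION & SPEC =====
def Spec_countRow (row : List String) (out : Int) : Prop := out = countRow_alt row
instance (row : List String) (out : Int) : Decidable (Spec_countRow row out) := by unfold Spec_countRow; infer_instance

-- ===== CLAIM (what is proved, stated in full; the proofs are below) =====
def Claim_equal_countRow : Prop := ∀ (row : List String), Dom_countRow row → Spec_countRow row (countRow row)

-- ===== LEMMAS AND PROOFS =====

-- The value of A's inner loop depends only on the sequence of scanned cells.
def pvScanCells : List String → Int
  | [] => 0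
  | c :: rest =>
    if c = "." then pvScanCells rest
    else if c = "B" then 0
    else if c = "p" then 1
    else pvScanCells rest

theorem pvScanA_eq_cells (row : List String) (idxs : List Int) :
    pvScanA row idxs = pvScanCells (idxs.map (fun i => PySem.List.pyGetD row i "")) := by
  induction idxs with
  | nil => rfl
  | cons i rest ih => simp only [pvScanA, pvScanCells, List.map_cons, ih]

-- The inner loop's value, in B's vocabulary: first kept ('B'/'p') cell decides.
theorem pvScanCells_eq_filter (l : List String) :
    pvScanCells l = if (l.filter pvKeep).head? = some "p" then 1 else 0 := by
  induction l with
  | nil => simp [pvScanCells]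
  | cons c rest ih =>
    by_cases hd : c = "."
    · subst hd; simpa [pvScanCells, pvKeep] using ih
    · by_cases hB : c = "B"
      · subst hB; simp [pvScanCells, pvKeep]
      · by_cases hp : c = "p"
        · subst hp; simp [pvScanCells, pvKeep]
        · have hk : pvKeep c = false := by
            simp [pvKeep, hB, hp]
          simp [pvScanCells, hd, hB, hp, hk, ih]

-- Cells scanned rightwards from i are drop i.
theorem pvCells_right (row : List String) (i : Nat) :
    (PySem.List.pyRange (i : Int) (row.length : Int) 1).map (fun j => PySem.List.pyGetD row j "") =
      row.drop i := by
  simpa using PySem.List.map_pyGetD_pyRange' row "" (a := (i : Int)) (by positivity)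

-- Cells scanned leftwards from i (i < len) are the reversed prefix take (i+1).
theorem pvCells_left (row : List String) (i : Nat) (h : i < row.length) :
    (PySem.List.pyRange (i : Int) (-1) (-1)).map (fun j => PySem.List.pyGetD row j "") =
      (row.take (i + 1)).reverse := by
  have h1 : PySem.List.pyRange (i : Int) (-1) (-1) = (PySem.List.pyRange 0 ((i : Int) + 1) 1).reverse := by
    simpa using PySem.List.pyRange_neg_one_eq_reverse (i : Int) (-1)
  have hsplit : PySem.List.pyRange 0 (row.length : Int) 1 =
      PySem.List.pyRange 0 ((i : Int) + 1) 1 ++ PySem.List.pyRange ((i : Int) + 1) (row.length : Int) 1 :=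
    PySem.List.pyRange_one_append 0 ((i : Int) + 1) (row.length : Int) (by positivity) (by exact_mod_cast h)
  have hfull := PySem.List.map_pyGetD_pyRange_zero' row ""
  rw [hsplit, List.map_append] at hfull
  have hsuffix : (PySem.List.pyRange ((i : Int) + 1) (row.length : Int) 1).map
      (fun j => PySem.List.pyGetD row j "") = row.drop (i + 1) := by
    have := PySem.List.map_pyGetD_pyRange' row "" (a := ((i + 1 : Nat) : Int)) (by positivity)
    rw [show ((i : Int) + 1) = ((i + 1 : Nat) : Int) by push_cast; ring]
    simpa using this
  rw [hsuffix] at hfull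
  have htd : row = row.take (i + 1) ++ row.drop (i + 1) := (List.take_append_drop _ _).symm
  have hpre : (PySem.List.pyRange 0 ((i : Int) + 1) 1).map (fun j => PySem.List.pyGetD row j "") =
      row.take (i + 1) := by
    exact List.append_cancel_right (hfull.trans htd)
  rw [h1, List.map_reverse, hpre]

-- Value of one 'R'-hit of the outer loop, in B's vocabulary.
theorem pvHit_eq (row : List String) (i : Nat) (h : i < row.length) (hR : row[i] = "R") :
    pvScanA row (PySem.List.pyRange (i : Int) (-1) (-1)) +
      pvScanA row (PySem.List.pyRange (i : Int) (row.length : Int) 1) =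
    (if (((PySem.List.slice row none (some (i : Int))).filter pvKeep).getLast? = some "p") then 1 else 0) +
      (if (((PySem.List.slice row (some ((i : Int) + 1)) none).filter pvKeep).head? = some "p") then 1 else 0) := by
  have hL : pvScanA row (PySem.List.pyRange (i : Int) (-1) (-1)) =
      if ((row.take i).filter pvKeep).getLast? = some "p" then 1 else 0 := by
    rw [pvScanA_eq_cells, pvCells_left row i h, pvScanCells_eq_filter]
    have htake : row.take (i + 1) = row.take i ++ [row[i]] :=
      List.take_succ_eq_append_getElem h
    rw [htake, hR]
    have : pvKeep "R" = false := by decide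
    simp [List.filter_reverse, List.head?_reverse, this]
  have hRt : pvScanA row (PySem.List.pyRange (i : Int) (row.length : Int) 1) =
      if ((row.drop (i + 1)).filter pvKeep).head? = some "p" then 1 else 0 := by
    rw [pvScanA_eq_cells, pvCells_right, pvScanCells_eq_filter]
    have hdrop : row.drop i = row[i] :: row.drop (i + 1) := List.drop_eq_getElem_cons h
    rw [hdrop, hR]
    have : pvKeep "R" = false := by decide
    simp [this]
  have hsliceL : PySem.List.slice row none (some (i : Int)) = row.take i := by
    simp [PySem.List.slice_to row (b := (i : Int)) (Int.natCast_nonneg i)]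
  have hsliceR : PySem.List.slice row (some ((i : Int) + 1)) none = row.drop (i + 1) := by
    have := PySem.List.slice_from row (a := ((i + 1 : Nat) : Int)) (by positivity)
    rw [show ((i : Int) + 1) = ((i + 1 : Nat) : Int) by push_cast; ring]
    simpa using this
  rw [hL, hRt, hsliceL, hsliceR]

-- The outer loop from index k computes according to the first 'R' at or after k.
theorem pvOuterA_eq (row : List String) :
    ∀ (k : Nat), k ≤ row.length →
      pvOuterA row (PySem.List.pyRange (k : Int) (row.length : Int) 1) =
        match PySem.List.index? (row.drop k) "R" with
        | none => 0
        | some j =>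
            pvScanA row (PySem.List.pyRange ((k + j : Nat) : Int) (-1) (-1)) +
              pvScanA row (PySem.List.pyRange ((k + j : Nat) : Int) (row.length : Int) 1) := by
  intro k hk
  induction hn : row.length - k generalizing k with
  | zero =>
    have hkl : k = row.length := by omega
    subst hkl
    rw [PySem.List.pyRange_one_eq_nil (by omega)]
    simp [pvOuterA, PySem.List.index?, List.idxOf?]
  | succ n ih =>
    have hlt : k < row.length := by omega
    rw [PySem.List.pyRange_one_cons (by exact_mod_cast hlt)]
    have hget : PySem.List.pyGetD row (k : Int) "" = row[k] := by
      simp [PySem.List.pyGetD_natCast, List.getElem?_eq_getElem hlt]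
    have hdrop : row.drop k = row[k] :: row.drop (k + 1) := List.drop_eq_getElem_cons hlt
    by_cases hR : row[k] = "R"
    · simp only [pvOuterA, hget, hR, if_pos]
      rw [hdrop, hR]
      simp [PySem.List.index?, List.idxOf?, List.findIdx?_cons]
    · simp only [pvOuterA, hget, if_neg hR]
      have hcast : ((k : Int) + 1) = ((k + 1 : Nat) : Int) := by push_cast; ring
      rw [hcast, ih (k + 1) (by omega) (by omega)]
      rw [hdrop]
      have hne : ¬ (row[k] == "R") := by simpa using hR
      simp only [PySem.List.index?, List.idxOf?, List.findIdx?_cons, hne]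
      cases hfi : List.findIdx? (fun x => x == "R") (row.drop (k + 1)) with
      | none => simp
      | some j =>
        simp only [Option.map_some]
        have h1 : k + 1 + j = k + (j + 1) := by omega
        rw [h1]
        simp

theorem countRow_spec' (row : List String) : countRow row = countRow_alt row := by
  unfold countRow countRow_alt
  have h0 := pvOuterA_eq row 0 (by omega)
  simp only [Nat.cast_zero, List.drop_zero, Nat.zero_add] at h0
  rw [h0]
  cases hidx : PySem.List.index? row "R" with
  | none =>
    have hmem : ¬ "R" ∈ row := by
      simpa [PySem.List.index?, List.idxOf?_eq_none_iff] using hidx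
    simp [hmem]
  | some i =>
    obtain ⟨hlt, hR, -⟩ := List.idxOf?_eq_some_iff.mp (show List.idxOf? "R" row = some i from hidx)
    have hmem : "R" ∈ row := hR ▸ List.getElem_mem hlt
    rw [if_pos hmem]
    exact pvHit_eq row i hlt hR

-- ===== VERDICT (by name: the statement is the Claim_ definition above) =====
theorem countRow_spec : Claim_equal_countRow := by
  intro row _
  unfold Spec_countRow
  exact countRow_spec' row
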